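-- pv_equiv track=rewrite | github.com/uscresl/AdaptiveSamplingPOMCP | sample_sim/planning/pomcp_rollout_allocation/ucb_arm.py | argmax_without
-- ===== SOURCE A (Python) =====
-- def argmax_without(xs,idx):
--     max_val = None
--     best_idx = None
--     for i,x in enumerate(xs):
--         if i != idx and (max_val is None or x > max_val):
--             max_val = x
--             best_idx = i
--     return best_idx
-- ===== SOURCE B (Python) =====
-- def argmax_without(xs, idx):
--     pairs = [(i, x) for i, x in enumerate(xs) if i != idx]
--     if not pairs:
--         return None
--     m = max(x for _, x in pairs)
--     for i, x in pairs:
--         if x == m: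
--             return i
-- ===== Notes on version B (the rewrite author's own statement) =====
-- stated objective: alternative
-- what changed: the fused single-scan running-argmax is replaced by three phases: build the eligible (index,value) pairs, one pass computing the maximum value, one pass returning the first index attaining it
import Mathlib
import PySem

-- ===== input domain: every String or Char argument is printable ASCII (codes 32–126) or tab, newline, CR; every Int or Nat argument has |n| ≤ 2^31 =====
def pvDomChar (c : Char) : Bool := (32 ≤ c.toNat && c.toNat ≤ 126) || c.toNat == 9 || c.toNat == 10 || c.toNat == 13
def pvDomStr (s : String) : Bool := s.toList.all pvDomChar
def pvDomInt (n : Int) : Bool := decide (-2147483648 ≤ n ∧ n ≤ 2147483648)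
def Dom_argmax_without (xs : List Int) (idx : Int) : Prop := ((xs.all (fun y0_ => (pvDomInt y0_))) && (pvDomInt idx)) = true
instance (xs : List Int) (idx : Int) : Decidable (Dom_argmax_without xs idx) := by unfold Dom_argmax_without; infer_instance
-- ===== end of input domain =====

-- B replaces A's fused single-scan running argmax by three phases (filter pairs, max value, first index attaining it); same cost, different decomposition.

-- ===== PORT A =====
-- loop body of A's for-loop: 'if i != idx and (max_val is None or x > max_val): max_val, best_idx = x, i'
def pvStepA (idx : Int) (s : Option Int × Option Int) (p : Int × Int) : Option Int × Option Int :=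
  if p.1 ≠ idx then
    match s.1 with
    | none => (some p.2, some p.1)
    | some m => if m < p.2 then (some p.2, some p.1) else s
  else s

def argmax_without (xs : List Int) (idx : Int) : Option Int :=
  ((PySem.List.enumerate xs 0).foldl (pvStepA idx) (none, none)).2

-- ===== PORT B =====
def argmax_without_alt (xs : List Int) (idx : Int) : Option Int :=
  let pairs := (PySem.List.enumerate xs 0).filter (fun p => p.1 != idx)
  if pairs = [] then none
  else
    match PySem.List.max? (pairs.map (·.2)) (fun y => y) with
    | none => none
    | some m => (pairs.find? (fun p => p.2 == m)).map (·.1)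

-- ===== PRECONDITION & SPEC =====
def Spec_argmax_without (xs : List Int) (idx : Int) (out : Option Int) : Prop := out = argmax_without_alt xs idx
instance (xs : List Int) (idx : Int) (out : Option Int) : Decidable (Spec_argmax_without xs idx out) := by unfold Spec_argmax_without; infer_instance

-- ===== CLAIM (what is proved, stated in full; the proofs are below) =====
def Claim_equal_argmax_without : Prop := ∀ (xs : List Int) (idx : Int), Dom_argmax_without xs idx → Spec_argmax_without xs idx (argmax_without xs idx)

-- ===== LEMMAS AND PROOFS =====

-- reference "first argmax" of a pair list, recursing from the front (head wins ties)
def pvBest : List (Int × Int) → Option (Int × Int)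
  | [] => none
  | p :: t =>
    match pvBest t with
    | none => some p
    | some q => if p.2 < q.2 then some q else some p

-- A's guarded fold equals the unguarded fold over the filtered pair list
theorem foldA_filter (idx : Int) (l : List (Int × Int)) (s : Option Int × Option Int) :
    l.foldl (pvStepA idx) s =
      (l.filter (fun p => p.1 != idx)).foldl (pvStepA idx) s := by
  induction l generalizing s with
  | nil => rfl
  | cons p t ih =>
    by_cases h : p.1 = idx
    · simp [h, pvStepA, ih]
    · simp [h, pvStepA, ih]

-- the unguarded fold from a some-state, characterised by pvBest
theorem fold_some (idx : Int) (l : List (Int × Int)) (m b : Int)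
    (hl : ∀ p ∈ l, p.1 ≠ idx) :
    l.foldl (pvStepA idx) (some m, some b) =
      match pvBest l with
      | none => (some m, some b)
      | some q => if m < q.2 then (some q.2, some q.1) else (some m, some b) := by
  induction l generalizing m b with
  | nil => rfl
  | cons p t ih =>
    have hp : p.1 ≠ idx := hl p (by simp)
    have ht : ∀ q ∈ t, q.1 ≠ idx := fun q hq => hl q (by simp [hq])
    simp only [List.foldl_cons, pvStepA, if_pos hp, pvBest]
    by_cases h1 : m < p.2
    · simp only [if_pos h1, ih _ _ ht]
      cases hq : pvBest t with
      | none => simp; omega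
      | some q =>
        by_cases h2 : p.2 < q.2
        · simp [if_pos h2, if_pos (by omega : m < q.2)]
        · simp [if_neg h2, if_pos h1]
    · simp only [if_neg h1, ih _ _ ht]
      cases hq : pvBest t with
      | none => simp [if_neg h1]
      | some q =>
        by_cases h2 : p.2 < q.2
        · simp [if_pos h2]
        · simp only [if_neg h2]
          by_cases h3 : m < q.2
          · omega
          · simp [if_neg h3, if_neg h1]

-- the unguarded fold from the initial (none, none) state
theorem fold_none (idx : Int) (l : List (Int × Int)) (hl : ∀ p ∈ l, p.1 ≠ idx) :
    l.foldl (pvStepA idx) (none, none) =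
      match pvBest l with
      | none => (none, none)
      | some q => (some q.2, some q.1) := by
  cases l with
  | nil => rfl
  | cons p t =>
    have hp : p.1 ≠ idx := hl p (by simp)
    have ht : ∀ q ∈ t, q.1 ≠ idx := fun q hq => hl q (by simp [hq])
    simp only [List.foldl_cons, pvStepA, if_pos hp]
    rw [fold_some idx t p.2 p.1 ht]
    simp only [pvBest]
    cases hq : pvBest t with
    | none => rfl
    | some q =>
      by_cases h2 : p.2 < q.2
      · simp [if_pos h2]
      · simp [if_neg h2]

theorem pvBest_none_iff (l : List (Int × Int)) : pvBest l = none ↔ l = [] := by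
  cases l with
  | nil => simp [pvBest]
  | cons p t =>
    simp only [pvBest]
    cases pvBest t
    · simp
    · simp; split <;> simp

-- running max of the values, in terms of pvBest
theorem foldl_max_best (l : List (Int × Int)) (a : Int) :
    (l.map (·.2)).foldl max a =
      match pvBest l with
      | none => a
      | some q => max a q.2 := by
  induction l generalizing a with
  | nil => rfl
  | cons p t ih =>
    simp only [List.map_cons, List.foldl_cons, ih, pvBest]
    cases pvBest t with
    | none => rfl
    | some q =>
      by_cases h : p.2 < q.2
      · simp [if_pos h, max_eq_right (le_of_lt h)]
      · simp [if_neg h, max_eq_left (by omega : q.2 ≤ p.2)]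

-- the first pair whose value equals pvBest's value is pvBest itself
theorem find_best (l : List (Int × Int)) (q : Int × Int) (hq : pvBest l = some q) :
    l.find? (fun p => p.2 == q.2) = some q := by
  induction l with
  | nil => simp [pvBest] at hq
  | cons p t ih =>
    simp only [pvBest] at hq
    cases hr : pvBest t with
    | none =>
      rw [hr] at hq
      simp only [Option.some.injEq] at hq
      subst hq
      simp
    | some r =>
      rw [hr] at hq
      change (if p.2 < r.2 then some r else some p) = some q at hq
      by_cases h2 : p.2 < r.2
      · rw [if_pos h2] at hq
        simp only [Option.some.injEq] at hq
        subst hq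
        rw [List.find?_cons_of_neg (by simp; omega)]
        exact ih hr
      · rw [if_neg h2] at hq
        simp only [Option.some.injEq] at hq
        subst hq
        simp

theorem filter_ne_idx (xs : List Int) (idx : Int) :
    ∀ p ∈ (PySem.List.enumerate xs 0).filter (fun p => p.1 != idx), p.1 ≠ idx := by
  intro p hp
  have := List.of_mem_filter hp
  simpa using this

-- ===== VERDICT (by name: the statement is the Claim_ definition above) =====
theorem argmax_without_spec : Claim_equal_argmax_without := by
  intro xs idx _
  unfold Spec_argmax_without argmax_without argmax_without_alt
  rw [foldA_filter, fold_none idx _ (filter_ne_idx xs idx)]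
  show _ = (let pairs := (PySem.List.enumerate xs 0).filter (fun p => p.1 != idx); _)
  simp only []
  generalize hpairs : (PySem.List.enumerate xs 0).filter (fun p => p.1 != idx) = pairs
  cases hb : pvBest pairs with
  | none =>
    have : pairs = [] := (pvBest_none_iff pairs).mp hb
    simp [this]
  | some q =>
    have hne : pairs ≠ [] := by
      intro h; rw [h] at hb; simp [pvBest] at hb
    rw [if_neg hne]
    obtain ⟨p, t, rfl⟩ := List.exists_cons_of_ne_nil hne
    rw [List.map_cons, PySem.List.max?_id_cons]
    have hmax : (t.map (·.2)).foldl max p.2 = q.2 := by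
      have h1 := foldl_max_best (p :: t) p.2
      rw [hb] at h1
      have h2 : (List.map (fun x => x.2) (p :: t)).foldl max p.2 = max p.2 q.2 := h1
      simp only [List.map_cons, List.foldl_cons, max_self] at h2
      have hq2 : p.2 ≤ q.2 := by
        simp only [pvBest] at hb
        cases hr : pvBest t with
        | none =>
          rw [hr] at hb
          change some p = some q at hb
          simp at hb; subst hb; omega
        | some r =>
          rw [hr] at hb
          change (if p.2 < r.2 then some r else some p) = some q at hb
          by_cases h : p.2 < r.2
          · rw [if_pos h] at hb; simp at hb; subst hb; omega
          · rw [if_neg h] at hb; simp at hb; subst hb; omega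
      omega
    rw [hmax]
    simp [find_best (p :: t) q hb]
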